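-- pv_equiv track=rewrite | github.com/softmatterlab/SmartTrap | AnalysisHelperFunctions.py | find_increasing_decreasing_regions
-- ===== SOURCE A (Python) =====
-- def find_increasing_decreasing_regions(signal):
--     increasing_regions = []
--     decreasing_regions = []
--
--     current_increasing = []
--     current_decreasing = []
--
--     for i in range(len(signal) - 1):
--         if signal[i+1] > signal[i]:
--             current_increasing.append(i)
--             if current_decreasing:
--                 decreasing_regions.append(current_decreasing)
--                 current_decreasing = []
--         elif signal[i+1] < signal[i]:
--             current_decreasing.append(i)
--             if current_increasing:
--                 increasing_regions.append(current_increasing)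
--                 current_increasing = []
--
--     # Append remaining regions if they exist
--     if current_increasing:
--         increasing_regions.append(current_increasing)
--     if current_decreasing:
--         decreasing_regions.append(current_decreasing)
--
--     return increasing_regions, decreasing_regions
-- ===== SOURCE B (Python) =====
-- # parameter renamed to `sig` only because the word `signal` is reserved by the harness; same positional signature as A
-- def find_increasing_decreasing_regions(sig):
--     # Two-pass: tabulate the nonzero adjacent-step signs, then group consecutive
--     # equal signs by comparing each pair with the previous sign, growing the
--     # last region in place or opening a new one.
--     pairs = [(i, 1 if sig[i + 1] > sig[i] else -1)
--              for i in range(len(sig) - 1)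
--              if sig[i + 1] != sig[i]]
--     increasing_regions = []
--     decreasing_regions = []
--     prev = 0
--     for idx, s in pairs:
--         tgt = increasing_regions if s == 1 else decreasing_regions
--         if s == prev:
--             tgt[-1].append(idx)
--         else:
--             tgt.append([idx])
--         prev = s
--     return increasing_regions, decreasing_regions
-- ===== Notes on version B (the rewrite author's own statement) =====
-- stated objective: alternative
-- what changed: Replaces A's single incremental loop with flush-on-sign-change bookkeeping by two passes: first tabulate the nonzero adjacent-step signs as (index, sign) pairs, then build both region lists back-to-front, opening a new region at each sign change.
import Mathlib
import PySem

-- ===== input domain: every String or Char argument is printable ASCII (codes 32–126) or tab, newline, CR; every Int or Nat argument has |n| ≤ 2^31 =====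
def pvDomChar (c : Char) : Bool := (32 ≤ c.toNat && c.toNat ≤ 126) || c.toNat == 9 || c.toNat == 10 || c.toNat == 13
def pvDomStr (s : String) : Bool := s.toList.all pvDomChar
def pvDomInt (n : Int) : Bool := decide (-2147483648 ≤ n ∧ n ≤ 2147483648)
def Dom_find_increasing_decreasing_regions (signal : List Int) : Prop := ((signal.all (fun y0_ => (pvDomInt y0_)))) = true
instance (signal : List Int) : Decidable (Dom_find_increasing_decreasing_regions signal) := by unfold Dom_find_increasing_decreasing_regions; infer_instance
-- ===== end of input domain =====

-- B replaces A's two-pending-buffers flush loop by two passes: tabulate the nonzero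
-- adjacent-step signs, then group consecutive equal signs by comparing with the
-- previous sign (objective: alternative decomposition; same cost, same return value).

-- ===== PORT A =====
-- one iteration of A's loop; state = (increasing_regions, decreasing_regions, current_increasing, current_decreasing)
def pvStepA (signal : List Int)
    (st : List (List Int) × List (List Int) × List Int × List Int) (i : Int) :
    List (List Int) × List (List Int) × List Int × List Int :=
  -- signal[i] / signal[i+1]: i ranges over range(len(signal)-1), so both indices are
  -- always in range and the `.getD 0` default is never used
  let x := (PySem.List.pyGet? signal i).getD 0
  let y := (PySem.List.pyGet? signal (i + 1)).getD 0
  if y > x then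
    (st.1, if st.2.2.2 = [] then st.2.1 else st.2.1 ++ [st.2.2.2], st.2.2.1 ++ [i], [])
  else if y < x then
    (if st.2.2.1 = [] then st.1 else st.1 ++ [st.2.2.1], st.2.1, [], st.2.2.2 ++ [i])
  else
    st

def find_increasing_decreasing_regions (signal : List Int) : List (List Int) × List (List Int) :=
  let st := (PySem.List.pyRange 0 ((signal.length : Int) - 1) 1).foldl (pvStepA signal)
              ([], [], [], [])
  -- append remaining regions if they exist
  (if st.2.2.1 = [] then st.1 else st.1 ++ [st.2.2.1],
   if st.2.2.2 = [] then st.2.1 else st.2.1 ++ [st.2.2.2])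

-- ===== PORT B =====
-- the sign table: [(i, 1 if sig[i+1] > sig[i] else -1) for i in range(len(sig)-1) if sig[i+1] != sig[i]]
def pvSign (sig : List Int) (i : Int) : Option (Int × Int) :=
  let x := (PySem.List.pyGet? sig i).getD 0
  let y := (PySem.List.pyGet? sig (i + 1)).getD 0
  if y > x then some (i, 1) else if y < x then some (i, -1) else none

def pvPairs (sig : List Int) : List (Int × Int) :=
  (PySem.List.pyRange 0 ((sig.length : Int) - 1) 1).filterMap (pvSign sig)

-- one iteration of B's grouping loop; state = (increasing_regions, decreasing_regions, prev);
-- the in-place `tgt[-1].append(idx)` is ported as rebuilding the last region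
def pvStepB (st : List (List Int) × List (List Int) × Int) (p : Int × Int) :
    List (List Int) × List (List Int) × Int :=
  if p.2 = st.2.2 then
    if p.2 = 1 then (st.1.dropLast ++ [st.1.getLastD [] ++ [p.1]], st.2.1, p.2)
    else (st.1, st.2.1.dropLast ++ [st.2.1.getLastD [] ++ [p.1]], p.2)
  else
    if p.2 = 1 then (st.1 ++ [[p.1]], st.2.1, p.2)
    else (st.1, st.2.1 ++ [[p.1]], p.2)

def find_increasing_decreasing_regions_alt (signal : List Int) : List (List Int) × List (List Int) :=
  let st := (pvPairs signal).foldl pvStepB ([], [], 0)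
  (st.1, st.2.1)

-- ===== PRECONDITION & SPEC =====
def Spec_find_increasing_decreasing_regions (signal : List Int) (out : List (List Int) × List (List Int)) : Prop := out = find_increasing_decreasing_regions_alt signal
instance (signal : List Int) (out : List (List Int) × List (List Int)) : Decidable (Spec_find_increasing_decreasing_regions signal out) := by unfold Spec_find_increasing_decreasing_regions; infer_instance

-- ===== CLAIM (what is proved, stated in full; the proofs are below) =====
def Claim_equal_find_increasing_decreasing_regions : Prop := ∀ (signal : List Int), Dom_find_increasing_decreasing_regions signal → Spec_find_increasing_decreasing_regions signal (find_increasing_decreasing_regions signal)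

-- ===== LEMMAS AND PROOFS =====

-- A's loop step, expressed through the sign-table entry at i
def pvStepP (st : List (List Int) × List (List Int) × List Int × List Int) (p : Int × Int) :
    List (List Int) × List (List Int) × List Int × List Int :=
  if p.2 = 1 then
    (st.1, if st.2.2.2 = [] then st.2.1 else st.2.1 ++ [st.2.2.2], st.2.2.1 ++ [p.1], [])
  else
    (if st.2.2.1 = [] then st.1 else st.1 ++ [st.2.2.1], st.2.1, [], st.2.2.2 ++ [p.1])

theorem pvStepA_eq_sign (signal : List Int) (st : List (List Int) × List (List Int) × List Int × List Int)
    (i : Int) :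
    pvStepA signal st i = (pvSign signal i).elim st (pvStepP st) := by
  simp only [pvStepA, pvSign]
  split_ifs <;> simp_all [pvStepP]

theorem foldl_filterMap_match {α β γ : Type} (f : β → Option γ) (g : α → γ → α)
    (l : List β) (init : α) :
    (l.filterMap f).foldl g init
      = l.foldl (fun st a => (f a).elim st (g st)) init := by
  induction l generalizing init with
  | nil => rfl
  | cons a l ih =>
    simp only [List.filterMap_cons, List.foldl_cons]
    cases f a <;> simp [ih]

-- every sign in the table is ±1
theorem pvPairs_valid (sig : List Int) : ∀ p ∈ pvPairs sig, p.2 = 1 ∨ p.2 = -1 := by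
  intro p hp
  simp only [pvPairs, List.mem_filterMap] at hp
  obtain ⟨i, -, hi⟩ := hp
  simp only [pvSign] at hi
  split_ifs at hi <;> (injection hi with h2; subst h2; simp)

-- the "append remaining regions" epilogue of A
def pvFinish (st : List (List Int) × List (List Int) × List Int × List Int) :
    List (List Int) × List (List Int) :=
  (if st.2.2.1 = [] then st.1 else st.1 ++ [st.2.2.1],
   if st.2.2.2 = [] then st.2.1 else st.2.1 ++ [st.2.2.2])

-- coupling invariant between A's fold state (incR, decR, ci, cd) and B's (inc, dec, prev):
-- whichever run is open in A is already stored as the last region on B's side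
def pvRel (stA : List (List Int) × List (List Int) × List Int × List Int)
    (stB : List (List Int) × List (List Int) × Int) : Prop :=
  (stB.2.2 = 1 ∧ stA.2.2.1 ≠ [] ∧ stA.2.2.2 = [] ∧
    stB.1 = stA.1 ++ [stA.2.2.1] ∧ stB.2.1 = stA.2.1) ∨
  (stB.2.2 = -1 ∧ stA.2.2.2 ≠ [] ∧ stA.2.2.1 = [] ∧
    stB.1 = stA.1 ∧ stB.2.1 = stA.2.1 ++ [stA.2.2.2]) ∨
  (stB.2.2 = 0 ∧ stA.2.2.1 = [] ∧ stA.2.2.2 = [] ∧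
    stB.1 = stA.1 ∧ stB.2.1 = stA.2.1)

theorem foldl_rel (ps : List (Int × Int)) (hv : ∀ p ∈ ps, p.2 = 1 ∨ p.2 = -1) :
    ∀ stA stB, pvRel stA stB →
      pvFinish (ps.foldl pvStepP stA) = ((ps.foldl pvStepB stB).1, (ps.foldl pvStepB stB).2.1) := by
  induction ps with
  | nil =>
    intro stA stB hrel
    rcases hrel with ⟨h1, h2, h3, h4, h5⟩ | ⟨h1, h2, h3, h4, h5⟩ | ⟨h1, h2, h3, h4, h5⟩ <;>
      simp [pvFinish, h2, h3, h4, h5]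
  | cons p ps ih =>
    obtain ⟨idx, s⟩ := p
    intro stA stB hrel
    have hs : s = 1 ∨ s = -1 := hv (idx, s) (by simp)
    have hv' : ∀ p ∈ ps, p.2 = 1 ∨ p.2 = -1 := fun p hp => hv p (List.mem_cons_of_mem _ hp)
    simp only [List.foldl_cons]
    apply ih hv'
    rcases hs with h | h <;> subst h <;>
      rcases hrel with ⟨h1, h2, h3, h4, h5⟩ | ⟨h1, h2, h3, h4, h5⟩ | ⟨h1, h2, h3, h4, h5⟩ <;>
      simp only [pvStepP, pvStepB, pvRel, h1, h2, h3, h4, h5] <;>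
      norm_num

-- ===== VERDICT (by name: the statement is the Claim_ definition above) =====
theorem find_increasing_decreasing_regions_spec : Claim_equal_find_increasing_decreasing_regions := by
  intro signal _
  unfold Spec_find_increasing_decreasing_regions
  show pvFinish ((PySem.List.pyRange 0 ((signal.length : Int) - 1) 1).foldl (pvStepA signal)
      ([], [], [], [])) = find_increasing_decreasing_regions_alt signal
  have h1 : (PySem.List.pyRange 0 ((signal.length : Int) - 1) 1).foldl (pvStepA signal)
      ([], [], [], []) = (pvPairs signal).foldl pvStepP ([], [], [], []) := by
    rw [pvPairs, foldl_filterMap_match]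
    exact PySem.List.foldl_congr_mem _ _ _ _ (fun st i _ => pvStepA_eq_sign signal st i)
  rw [h1]
  exact foldl_rel (pvPairs signal) (pvPairs_valid signal) ([], [], [], []) ([], [], 0)
    (Or.inr (Or.inr ⟨rfl, rfl, rfl, rfl, rfl⟩))
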